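-- pv_equiv track=rewrite | github.com/notnotraju/ecfft-python | ecfft_algorithms.py | batch_inv
-- ===== SOURCE A (Python) =====
-- q = 21888242871839275222246405745257275088696311157297823662689037894645226208583
--
-- def fmul(a, b):  return (a * b) % q
--
-- def finv(a):
--     assert a % q != 0, "division by zero"
--     return pow(a, q - 2, q)
--
-- def batch_inv(xs):
--     """Montgomery batch inversion — one inversion, O(n) muls."""
--     n = len(xs)
--     if n == 0: return []
--     prefix = [0] * n
--     prefix[0] = xs[0]
--     for i in range(1, n):
--         prefix[i] = fmul(prefix[i - 1], xs[i])
--     inv_acc = finv(prefix[-1])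
--     out = [0] * n
--     for i in range(n - 1, 0, -1):
--         out[i] = fmul(inv_acc, prefix[i - 1])
--         inv_acc = fmul(inv_acc, xs[i])
--     out[0] = inv_acc
--     return out
-- ===== SOURCE B (Python) =====
-- q = 21888242871839275222246405745257275088696311157297823662689037894645226208583
--
-- def finv(a):
--     assert a % q != 0, "division by zero"
--     return pow(a, q - 2, q)
--
-- def batch_inv(xs):
--     """Prefix/suffix product tables + one inversion, combined pointwise (no mutation)."""
--     if not xs:
--         return []
--     pre = [1]
--     for x in xs:
--         pre.append(pre[-1] * x % q)
--     suf = [1]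
--     for x in reversed(xs):
--         suf.append(suf[-1] * x % q)
--     suf.reverse()
--     t = finv(pre[-1])
--     return [pre[i] * suf[i + 1] % q * t % q for i in range(len(xs))]
-- ===== Notes on version B (the rewrite author's own statement) =====
-- stated objective: alternative
-- what changed: A does a forward prefix pass and then an in-place backward pass that threads a running inverse accumulator through mutated slots; B builds immutable prefix- and suffix-product tables in two independent passes and combines them pointwise with the single shared inverse, with no backward accumulator and no mutation.
import Mathlib
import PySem

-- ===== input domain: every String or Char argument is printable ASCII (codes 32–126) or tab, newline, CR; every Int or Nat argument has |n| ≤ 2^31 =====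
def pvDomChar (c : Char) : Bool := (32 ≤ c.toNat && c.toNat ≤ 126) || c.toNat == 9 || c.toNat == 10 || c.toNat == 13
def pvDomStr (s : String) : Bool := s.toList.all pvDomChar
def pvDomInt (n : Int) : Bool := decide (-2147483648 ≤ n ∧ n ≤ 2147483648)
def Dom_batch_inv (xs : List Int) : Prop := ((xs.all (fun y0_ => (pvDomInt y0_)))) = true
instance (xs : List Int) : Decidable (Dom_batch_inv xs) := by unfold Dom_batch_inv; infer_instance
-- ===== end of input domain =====

-- B replaces A's in-place backward pass with its running inverse accumulator by explicit
-- prefix- and suffix-product tables combined pointwise with one shared inverse (alternative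
-- structure, same O(n) cost); return values are proved equal, neither version mutates its input.

-- ===== PORT A =====
def pvq : Int := 21888242871839275222246405745257275088696311157297823662689037894645226208583

def pv_fmul (a b : Int) : Int := PySem.Int.mod (a * b) pvq

-- hand port of Python's pow(b, e, m) by binary exponentiation (PySem.Int.powMod is not
-- evaluable at this exponent); exact for e ≥ 0 and m > 0 — see pvPowMod_eq below
def pvPowMod (b : Int) (e : Nat) (m : Int) : Int :=
  if e = 0 then 1 % m
  else
    let r := pvPowMod (b * b % m) (e / 2) m
    if e % 2 = 1 then r * b % m else r
termination_by e
decreasing_by exact Nat.div_lt_self (by omega) (by omega)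

def pv_finv (a : Int) : Int := pvPowMod a (pvq - 2).toNat pvq

def batch_inv (xs : List Int) : List Int :=
  let n : Int := xs.length
  if n = 0 then []
  else
    let pfx0 : List Int := List.replicate xs.length 0
    let pfx1 : List Int := PySem.List.pySetD pfx0 0 (PySem.List.pyGetD xs 0 0)
    let pfx : List Int := (PySem.List.pyRange 1 n 1).foldl
      (fun p i => PySem.List.pySetD p i
        (pv_fmul (PySem.List.pyGetD p (i - 1) 0) (PySem.List.pyGetD xs i 0))) pfx1
    let invAcc : Int := pv_finv (PySem.List.pyGetD pfx (-1) 0)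
    let out0 : List Int := List.replicate xs.length 0
    let st : List Int × Int := (PySem.List.pyRange (n - 1) 0 (-1)).foldl
      (fun s i =>
        (PySem.List.pySetD s.1 i (pv_fmul s.2 (PySem.List.pyGetD pfx (i - 1) 0)),
         pv_fmul s.2 (PySem.List.pyGetD xs i 0))) (out0, invAcc)
    PySem.List.pySetD st.1 0 st.2

-- ===== PORT B =====
def batch_inv_alt (xs : List Int) : List Int :=
  if xs = [] then []
  else
    let pre : List Int := xs.foldl
      (fun p x => p ++ [PySem.Int.mod (PySem.List.pyGetD p (-1) 0 * x) pvq]) [1]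
    let sufR : List Int := xs.reverse.foldl
      (fun s x => s ++ [PySem.Int.mod (PySem.List.pyGetD s (-1) 0 * x) pvq]) [1]
    let suf : List Int := sufR.reverse
    let t : Int := pv_finv (PySem.List.pyGetD pre (-1) 0)
    (PySem.List.pyRange 0 (xs.length : Int) 1).map
      (fun i => PySem.Int.mod
        (PySem.Int.mod (PySem.List.pyGetD pre i 0 * PySem.List.pyGetD suf (i + 1) 0) pvq * t) pvq)

-- ===== PRECONDITION & SPEC =====
-- Pre_ excludes exactly the inputs on which A's `finv` assertion fires (AssertionError
-- "division by zero"): those whose product is divisible by q.  B raises the same way there.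
def Pre_batch_inv (xs : List Int) : Prop := PySem.Int.mod xs.prod pvq ≠ 0
instance (xs : List Int) : Decidable (Pre_batch_inv xs) := by unfold Pre_batch_inv; infer_instance

def pvWitness_batch_inv : List Int := [1, 2, 3]

def Spec_batch_inv (xs : List Int) (out : List Int) : Prop := out = batch_inv_alt xs
instance (xs : List Int) (out : List Int) : Decidable (Spec_batch_inv xs out) := by
  unfold Spec_batch_inv; infer_instance

-- ===== CLAIM (what is proved, stated in full; the proofs are below) =====
def Claim_equal_batch_inv : Prop :=
  ∀ (xs : List Int), Dom_batch_inv xs → Pre_batch_inv xs → Spec_batch_inv xs (batch_inv xs)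

-- ===== LEMMAS AND PROOFS =====

-- the common elementwise value: (∏xs)^(q-2) · ∏(before i) · ∏(after i)  mod q
def pvRef (xs : List Int) (i : Nat) : Int :=
  (xs.prod ^ (pvq - 2).toNat * (xs.take i).prod * (xs.drop (i + 1)).prod) % pvq
def pvModel (xs : List Int) : List Int := (List.range xs.length).map (pvRef xs)

-- A's prefix-table entry: raw xs[0] at index 0, running product mod q after that
def pvPm (xs : List Int) (i : Nat) : Int :=
  if i = 0 then xs.getD 0 0 else (xs.take (i + 1)).prod % pvq
-- A's inverse accumulator before processing index j (downward loop)
def pvAcc (xs : List Int) (j : Nat) : Int :=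
  (xs.prod ^ (pvq - 2).toNat % pvq * (xs.drop (j + 1)).prod) % pvq
-- A's out list before processing index j: entries above j already written
def pvOut (xs : List Int) (j : Nat) : List Int :=
  (List.range xs.length).map (fun i => if j < i then pvRef xs i else 0)

theorem pvq_pos : (0 : Int) < pvq := by norm_num [pvq]

theorem pv_emod_mul_left (a b m : Int) : (a % m * b) % m = (a * b) % m := by
  conv_lhs => rw [Int.mul_emod]
  rw [Int.emod_emod_of_dvd _ dvd_rfl, ← Int.mul_emod]

theorem pv_pow_emod (a : Int) (e : Nat) (m : Int) : (a % m) ^ e % m = a ^ e % m := by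
  have h : Int.ModEq m (a % m) a := Int.emod_emod_of_dvd a dvd_rfl
  exact h.pow e

theorem pvPowMod_eq (b : Int) (e : Nat) (m : Int) :
    pvPowMod b e m = b ^ e % m := by
  induction e using Nat.strong_induction_on generalizing b with
  | _ e ih =>
    rw [pvPowMod]
    by_cases he : e = 0
    · simp [he]
    · simp only [if_neg he]
      have hr := ih (e / 2) (Nat.div_lt_self (by omega) (by omega)) (b * b % m)
      have hr2 : (b * b % m) ^ (e / 2) % m = b ^ (2 * (e / 2)) % m := by
        rw [pv_pow_emod]
        congr 1
        rw [← pow_two, ← pow_mul, mul_comm 2 (e / 2)]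
      by_cases hp : e % 2 = 1
      · rw [if_pos hp, hr, hr2, pv_emod_mul_left, ← pow_succ,
          show 2 * (e / 2) + 1 = e from (by omega)]
      · rw [if_neg hp, hr, hr2, show 2 * (e / 2) = e from (by omega)]

theorem pv_getD_map_range (f : Nat → Int) (n k : Nat) (h : k < n) :
    ((List.range n).map f).getD k 0 = f k := by
  rw [List.getD_eq_getElem _ _ (by simpa using h)]; simp

theorem pv_getD_last (f : Nat → Int) (n : Nat) (hn : 0 < n) :
    PySem.List.pyGetD ((List.range n).map f) (-1) 0 = f (n - 1) := by
  obtain ⟨m, rfl⟩ : ∃ m, n = m + 1 := ⟨n - 1, by omega⟩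
  rw [List.range_succ, List.map_append, List.map_singleton,
    PySem.List.pyGetD_neg_one_append_singleton]
  simp

theorem pv_pre_char (xs : List Int) :
    xs.foldl (fun p x => p ++ [PySem.Int.mod (PySem.List.pyGetD p (-1) 0 * x) pvq]) [1]
      = (List.range (xs.length + 1)).map (fun i => (xs.take i).prod % pvq) := by
  induction xs using List.reverseRecOn with
  | nil => simp; norm_num [pvq]
  | append_singleton ys y ih =>
      rw [List.foldl_append, ih]
      simp only [List.foldl_cons, List.foldl_nil]
      have hlast : PySem.List.pyGetD ((List.range (ys.length + 1)).map
          (fun i => (ys.take i).prod % pvq)) (-1) 0 = (ys.take ys.length).prod % pvq := by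
        rw [List.range_succ, List.map_append]
        simp
      rw [hlast]
      rw [List.length_append, List.length_singleton]
      rw [List.range_succ (n := ys.length + 1), List.map_append]
      congr 1
      · apply List.map_congr_left
        intro i hi
        rw [List.take_append_of_le_length (by simpa using Nat.lt_succ_iff.mp (List.mem_range.mp hi))]
      · simp only [List.map_singleton]
        rw [List.take_length, List.take_of_length_le (by simp), List.prod_append,
          List.prod_singleton, PySem.Int.mod_eq_emod_of_pos pvq_pos, pv_emod_mul_left]

theorem pv_pfx_inv (xs : List Int) (m : Nat) (hm : m ≤ xs.length - 1) (hxs : xs ≠ []) :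
    (PySem.List.pyRange 1 (1 + (m : Int)) 1).foldl
      (fun p i => PySem.List.pySetD p i
        (pv_fmul (PySem.List.pyGetD p (i - 1) 0) (PySem.List.pyGetD xs i 0)))
      (PySem.List.pySetD (List.replicate xs.length 0) 0 (PySem.List.pyGetD xs 0 0))
      = (List.range xs.length).map (fun i => if i ≤ m then pvPm xs i else 0) := by
  have hn : 0 < xs.length := List.length_pos_iff.mpr hxs
  induction m with
  | zero =>
      rw [PySem.List.pyRange_one_eq_nil (by norm_num), List.foldl_nil,
        PySem.List.pySetD_of_nonneg _ _ le_rfl, PySem.List.pyGetD_zero]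
      apply List.ext_getElem (by simp)
      intro i h1 h2
      simp only [List.getElem_set, List.getElem_map, List.getElem_range, List.getElem_replicate,
        Int.toNat_zero]
      rcases Nat.eq_zero_or_pos i with h | h
      · subst h; simp [pvPm]
      · rw [if_neg (by omega), if_neg (by omega)]
  | succ m ih =>
      have hm' : m ≤ xs.length - 1 := by omega
      have hlen : m + 1 < xs.length := by omega
      have hcast : (1 : Int) + ((m : Nat) + 1 : Nat) = (1 + (m : Int)) + 1 := by omega
      rw [hcast, PySem.List.pyRange_one_succ_right (by omega), List.foldl_append, ih hm',
        List.foldl_cons, List.foldl_nil]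
      have hidx : (1 : Int) + (m : Int) - 1 = ((m : Nat) : Int) := by ring
      have hgp : PySem.List.pyGetD ((List.range xs.length).map
          (fun i => if i ≤ m then pvPm xs i else 0)) ((1 : Int) + (m : Int) - 1) 0 = pvPm xs m := by
        rw [hidx, PySem.List.pyGetD_natCast, pv_getD_map_range _ _ _ (by omega)]
        simp
      have hgx : PySem.List.pyGetD xs (1 + (m : Int)) 0 = xs[m + 1]'hlen := by
        rw [show (1 : Int) + (m : Int) = ((m + 1 : Nat) : Int) from (by push_cast; ring),
          PySem.List.pyGetD_natCast, List.getD_eq_getElem _ _ hlen]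
      rw [hgp, hgx]
      have hval : pv_fmul (pvPm xs m) (xs[m + 1]'hlen) = pvPm xs (m + 1) := by
        have h1 : pvPm xs (m + 1) = (xs.take (m + 1 + 1)).prod % pvq := by simp [pvPm]
        rw [h1, pv_fmul, PySem.Int.mod_eq_emod_of_pos pvq_pos]
        rcases Nat.eq_zero_or_pos m with h | h
        · subst h
          simp only [pvPm]
          rw [List.prod_take_succ _ 1 hlen, List.prod_take_succ _ 0 (by omega)]
          simp [List.getD_eq_getElem?_getD, List.getElem?_eq_getElem hn]
        · simp only [pvPm, if_neg (show ¬ (m = 0) by omega)]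
          rw [pv_emod_mul_left]
          conv_rhs => rw [List.prod_take_succ _ (m + 1) hlen]
      rw [hval]
      rw [PySem.List.pySetD_of_nonneg _ _ (by positivity),
        show ((1 : Int) + (m : Int)).toNat = m + 1 from (by omega)]
      apply List.ext_getElem (by simp)
      intro i h1 h2
      simp only [List.getElem_set, List.getElem_map, List.getElem_range]
      by_cases hi : m + 1 = i
      · subst hi; rw [if_pos rfl, if_pos (by omega)]
      · rw [if_neg hi]
        by_cases hi2 : i ≤ m
        · rw [if_pos hi2, if_pos (by omega)]
        · rw [if_neg hi2, if_neg (by omega)]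

theorem pvPm_modeq (xs : List Int) (hn : 0 < xs.length) (j : Nat) :
    Int.ModEq pvq (pvPm xs j) ((xs.take (j + 1)).prod) := by
  rcases Nat.eq_zero_or_pos j with h | h
  · subst h
    simp only [pvPm]
    rw [List.prod_take_succ _ 0 hn, List.getD_eq_getElem _ _ hn]
    simp
  · simp only [pvPm, if_neg (show ¬ (j = 0) by omega)]
    exact Int.emod_emod_of_dvd _ dvd_rfl

theorem pvAcc_modeq (xs : List Int) (j : Nat) :
    Int.ModEq pvq (pvAcc xs j) (xs.prod ^ (pvq - 2).toNat * (xs.drop (j + 1)).prod) := by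
  have h1 : Int.ModEq pvq (pvAcc xs j)
      (xs.prod ^ (pvq - 2).toNat % pvq * (xs.drop (j + 1)).prod) :=
    Int.emod_emod_of_dvd _ dvd_rfl
  have h2 : Int.ModEq pvq (xs.prod ^ (pvq - 2).toNat % pvq) (xs.prod ^ (pvq - 2).toNat) :=
    Int.emod_emod_of_dvd _ dvd_rfl
  exact h1.trans (h2.mul (Int.ModEq.refl _))

theorem pv_out_inv (xs : List Int) (j : Nat) (hj : j ≤ xs.length - 1) (hxs : xs ≠ []) :
    (PySem.List.pyRange (j : Int) 0 (-1)).foldl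
      (fun s i =>
        (PySem.List.pySetD s.1 i (pv_fmul s.2
          (PySem.List.pyGetD ((List.range xs.length).map (pvPm xs)) (i - 1) 0)),
         pv_fmul s.2 (PySem.List.pyGetD xs i 0))) (pvOut xs j, pvAcc xs j)
      = (pvOut xs 0, pvAcc xs 0) := by
  have hn : 0 < xs.length := List.length_pos_iff.mpr hxs
  induction j with
  | zero => rw [Nat.cast_zero, PySem.List.pyRange_neg_one_eq_nil le_rfl, List.foldl_nil]
  | succ j ih =>
      have hlen : j + 1 < xs.length := by omega
      rw [show ((j + 1 : Nat) : Int) = (j : Int) + 1 from (by push_cast; ring),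
        PySem.List.pyRange_neg_one_cons (by positivity), List.foldl_cons]
      have hidx : (j : Int) + 1 - 1 = ((j : Nat) : Int) := by ring
      have hgp : PySem.List.pyGetD ((List.range xs.length).map (pvPm xs))
          ((j : Int) + 1 - 1) 0 = pvPm xs j := by
        rw [hidx, PySem.List.pyGetD_natCast, pv_getD_map_range _ _ _ (by omega)]
      have hgx : PySem.List.pyGetD xs ((j : Int) + 1) 0 = xs[j + 1]'hlen := by
        rw [show (j : Int) + 1 = ((j + 1 : Nat) : Int) from (by push_cast; ring),
          PySem.List.pyGetD_natCast, List.getD_eq_getElem _ _ hlen]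
      have hfst : pv_fmul (pvAcc xs (j + 1)) (pvPm xs j) = pvRef xs (j + 1) := by
        rw [pv_fmul, PySem.Int.mod_eq_emod_of_pos pvq_pos, pvRef]
        have h2 := (pvAcc_modeq xs (j + 1)).mul (pvPm_modeq xs hn j)
        have h3 : xs.prod ^ (pvq - 2).toNat * (xs.drop (j + 1 + 1)).prod * (xs.take (j + 1)).prod
            = xs.prod ^ (pvq - 2).toNat * (xs.take (j + 1)).prod * (xs.drop (j + 1 + 1)).prod := by
          ring
        rw [h3] at h2
        exact h2
      have hsnd : pv_fmul (pvAcc xs (j + 1)) (PySem.List.pyGetD xs ((j : Int) + 1) 0)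
          = pvAcc xs j := by
        rw [hgx, pv_fmul, PySem.Int.mod_eq_emod_of_pos pvq_pos]
        have h2 := (pvAcc_modeq xs (j + 1)).mul (Int.ModEq.refl (xs[j + 1]'hlen))
        have h4 : Int.ModEq pvq (pvAcc xs j)
            (xs.prod ^ (pvq - 2).toNat * (xs.drop (j + 1 + 1)).prod * xs[j + 1]'hlen) := by
          have h5 : (xs.drop (j + 1)).prod = xs[j + 1]'hlen * (xs.drop (j + 1 + 1)).prod := by
            rw [List.drop_eq_getElem_cons hlen, List.prod_cons]
          refine (pvAcc_modeq xs j).trans ?_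
          rw [h5]
          exact Int.ModEq.refl _ |>.trans (by rw [show xs.prod ^ (pvq - 2).toNat *
            (xs[j + 1]'hlen * (xs.drop (j + 1 + 1)).prod) = xs.prod ^ (pvq - 2).toNat *
            (xs.drop (j + 1 + 1)).prod * xs[j + 1]'hlen from (by ring)])
        have h6 : pvAcc xs j % pvq = pvAcc xs j := by
          unfold pvAcc; exact Int.emod_emod_of_dvd _ dvd_rfl
        rw [← h6]
        exact h2.trans h4.symm
      have hset : PySem.List.pySetD (pvOut xs (j + 1)) ((j : Int) + 1) (pvRef xs (j + 1))
          = pvOut xs j := by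
        rw [PySem.List.pySetD_of_nonneg _ _ (by positivity),
          show ((j : Int) + 1).toNat = j + 1 from (by omega)]
        apply List.ext_getElem (by simp [pvOut])
        intro i h1 h2
        simp only [pvOut, List.getElem_set, List.getElem_map, List.getElem_range]
        by_cases hi : j + 1 = i
        · subst hi; rw [if_pos rfl, if_pos (by omega)]
        · rw [if_neg hi]
          by_cases hi2 : j + 1 < i
          · rw [if_pos hi2, if_pos (by omega)]
          · rw [if_neg hi2, if_neg (by omega)]
      rw [hgp, hfst, hsnd, hset, hidx]
      exact ih (by omega)

theorem pv_t0 (xs : List Int) (hxs : xs ≠ []) :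
    pv_finv (pvPm xs (xs.length - 1)) = xs.prod ^ (pvq - 2).toNat % pvq := by
  have hn : 0 < xs.length := List.length_pos_iff.mpr hxs
  rw [pv_finv, pvPowMod_eq _ _ pvq]
  rcases Nat.eq_zero_or_pos (xs.length - 1) with h | h
  · obtain ⟨a, rfl⟩ := List.length_eq_one_iff.mp (show xs.length = 1 by omega)
    simp [pvPm]
  · rw [pvPm, if_neg (by omega), show xs.length - 1 + 1 = xs.length from (by omega),
      List.take_length, pv_pow_emod]

theorem pv_A_model (xs : List Int) : batch_inv xs = pvModel xs := by
  by_cases hxs : xs = []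
  · simp [batch_inv, pvModel, hxs]
  · have hn : 0 < xs.length := List.length_pos_iff.mpr hxs
    simp only [batch_inv]
    rw [if_neg (by simpa using hn.ne')]
    have hc : (xs.length : Int) = 1 + ((xs.length - 1 : Nat) : Int) := by omega
    rw [hc, pv_pfx_inv xs (xs.length - 1) le_rfl hxs]
    have hmap : (List.range xs.length).map (fun i => if i ≤ xs.length - 1 then pvPm xs i else 0)
        = (List.range xs.length).map (pvPm xs) := by
      apply List.map_congr_left
      intro i hi
      rw [if_pos (by have := List.mem_range.mp hi; omega)]
    rw [hmap, pv_getD_last _ _ hn, pv_t0 xs hxs]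
    have hr : (1 : Int) + ((xs.length - 1 : Nat) : Int) - 1 = ((xs.length - 1 : Nat) : Int) := by
      ring
    rw [hr]
    have hout0 : List.replicate xs.length (0 : Int) = pvOut xs (xs.length - 1) := by
      apply List.ext_getElem (by simp [pvOut])
      intro i h1 h2
      simp only [pvOut, List.getElem_replicate, List.getElem_map, List.getElem_range]
      rw [if_neg (by simp at h1; omega)]
    have hacc0 : xs.prod ^ (pvq - 2).toNat % pvq = pvAcc xs (xs.length - 1) := by
      rw [pvAcc, show xs.length - 1 + 1 = xs.length from (by omega), List.drop_length,
        List.prod_nil, mul_one, Int.emod_emod_of_dvd _ dvd_rfl]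
    rw [hout0, hacc0, pv_out_inv xs (xs.length - 1) le_rfl hxs]
    have hacc : pvAcc xs 0 = pvRef xs 0 := by
      rw [pvAcc, pvRef]
      simp only [List.take_zero, List.prod_nil, mul_one, zero_add]
      rw [pv_emod_mul_left]
    rw [hacc, PySem.List.pySetD_of_nonneg _ _ le_rfl]
    apply List.ext_getElem (by simp [pvOut, pvModel])
    intro i h1 h2
    simp only [pvOut, pvModel, Int.toNat_zero, List.getElem_set, List.getElem_map,
      List.getElem_range]
    rcases Nat.eq_zero_or_pos i with h | h
    · subst h; simp
    · rw [if_neg (by omega), if_pos (by omega)]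

theorem pv_B_model (xs : List Int) : batch_inv_alt xs = pvModel xs := by
  by_cases hxs : xs = []
  · simp [batch_inv_alt, pvModel, hxs]
  · unfold batch_inv_alt
    rw [if_neg hxs]
    simp only [pv_pre_char]
    simp only [List.length_reverse]
    set n := xs.length with hn
    have hnpos : 0 < n := List.length_pos_iff.mpr hxs
    -- the shared inverse value
    have hlastpre : PySem.List.pyGetD ((List.range (n + 1)).map
        (fun i => (xs.take i).prod % pvq)) (-1) 0 = xs.prod % pvq := by
      rw [List.range_succ, List.map_append, List.map_singleton, List.take_length,
        PySem.List.pyGetD_neg_one_append_singleton]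
    rw [hlastpre]
    have ht : pv_finv (xs.prod % pvq) = xs.prod ^ (pvq - 2).toNat % pvq := by
      rw [pv_finv, pvPowMod_eq _ _ pvq, pv_pow_emod]
    rw [ht]
    -- index set
    rw [PySem.List.pyRange_one, List.map_map, pvModel]
    have : ((n : Int) - 0).toNat = n := by omega
    rw [this]
    apply List.map_congr_left
    intro k hk
    have hk' : k < n := List.mem_range.mp hk
    simp only [Function.comp_apply, zero_add]
    -- pre[k]
    rw [PySem.List.pyGetD_natCast, pv_getD_map_range _ _ _ (by omega)]
    -- suf[k+1]
    have hcast : (k : Int) + 1 = ((k + 1 : Nat) : Int) := by push_cast; ring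
    rw [hcast, PySem.List.pyGetD_natCast]
    have hsuf : (((List.range (n + 1)).map
        (fun i => (xs.reverse.take i).prod % pvq)).reverse).getD (k + 1) 0
        = (xs.drop (k + 1)).prod % pvq := by
      rw [List.getD_eq_getElem _ _ (by simp; omega), List.getElem_reverse]
      simp only [List.length_map, List.length_range]
      rw [List.getElem_map, List.getElem_range]
      have h1 : n + 1 - 1 - (k + 1) = n - (k + 1) := by omega
      rw [h1, List.take_reverse, hn]
      have h2 : xs.length - (xs.length - (k + 1)) = k + 1 := by omega
      rw [h2, List.prod_reverse]
    rw [hsuf]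
    -- final congruence
    rw [PySem.Int.mod_eq_emod_of_pos pvq_pos, PySem.Int.mod_eq_emod_of_pos pvq_pos, pvRef]
    have h1 : (xs.take k).prod % pvq ≡ (xs.take k).prod [ZMOD pvq] :=
      Int.emod_emod_of_dvd _ dvd_rfl
    have h2 : (xs.drop (k + 1)).prod % pvq ≡ (xs.drop (k + 1)).prod [ZMOD pvq] :=
      Int.emod_emod_of_dvd _ dvd_rfl
    have h3 : xs.prod ^ (pvq - 2).toNat % pvq ≡ xs.prod ^ (pvq - 2).toNat [ZMOD pvq] :=
      Int.emod_emod_of_dvd _ dvd_rfl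
    calc ((xs.take k).prod % pvq * ((xs.drop (k + 1)).prod % pvq) % pvq
            * (xs.prod ^ (pvq - 2).toNat % pvq)) % pvq
        = ((xs.take k).prod % pvq * ((xs.drop (k + 1)).prod % pvq)
            * (xs.prod ^ (pvq - 2).toNat % pvq)) % pvq := pv_emod_mul_left _ _ _
      _ = ((xs.take k).prod * (xs.drop (k + 1)).prod
            * xs.prod ^ (pvq - 2).toNat) % pvq := ((h1.mul h2).mul h3)
      _ = (xs.prod ^ (pvq - 2).toNat * (xs.take k).prod * (xs.drop (k + 1)).prod) % pvq := by
            ring_nf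

-- ===== VERDICT (by name: the statement is the Claim_ definition above) =====
theorem batch_inv_spec : Claim_equal_batch_inv := by
  intro xs _ _
  unfold Spec_batch_inv
  rw [pv_A_model, pv_B_model]
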